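-- pv_equiv track=rewrite | github.com/JoshMayerr/cs330 | hwk03/D.py | max_volume
-- ===== SOURCE A (Python) =====
-- def dfs(grid, visited, i, j):
--     stack = [(i, j)]
--     volume = 0
--     while stack:
--         x, y = stack.pop()
--         if (x, y) in visited:
--             continue
--         visited.add((x, y))
--         volume += grid[x][y]
--         for l, r in [(-1, 0), (1, 0), (0, -1), (0, 1)]:
--             movex, movey = x + l, y + r
--             if 0 <= movex < len(grid) and 0 <= movey < len(grid[0]) and grid[movex][movey] > 0 and (movex, movey) not in visited:
--                 stack.append((movex, movey))
--     return volume
--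
-- def max_volume(test_cases):
--     results = []
--     for grid in test_cases:
--         n = len(grid)
--         m = len(grid[0])
--         visited = set()
--         max_volume = 0
--
--         for i in range(n):
--             for j in range(m):
--                 if grid[i][j] > 0 and (i, j) not in visited:
--                     volume = dfs(grid, visited, i, j)
--                     max_volume = max(max_volume, volume)
--
--         results.append(max_volume)
--     return results
-- ===== SOURCE B (Python) =====
-- def max_volume(test_cases):
--     # Single-pass connected-component labeling: scan the grid once in row-major
--     # order, merging the components that touch each positive cell from above/left.
--     results = []
--     for grid in test_cases:
--         n = len(grid)
--         m = len(grid[0])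
--         comps = []  # list of (set_of_cells, total)
--         for i in range(n):
--             for j in range(m):
--                 v = grid[i][j]
--                 if 0 < v:
--                     cells = {(i, j)}
--                     total = v
--                     rest = []
--                     for cs, t in comps:
--                         if (i - 1, j) in cs or (i, j - 1) in cs:
--                             cells |= cs
--                             total += t
--                         else:
--                             rest.append((cs, t))
--                     rest.append((cells, total))
--                     comps = rest
--         best = 0
--         for _, t in comps:
--             if best < t:
--                 best = t
--         results.append(best)
--     return results
-- ===== Notes on version B (the rewrite author's own statement) =====
-- stated objective: alternative
-- what changed: Replaces the per-cell stack-based DFS flood fill with a shared visited set by a single row-major pass that merges the existing components touching each positive cell from above/left (incremental connected-component labeling), then takes the max of the component totals.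
import Mathlib
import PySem

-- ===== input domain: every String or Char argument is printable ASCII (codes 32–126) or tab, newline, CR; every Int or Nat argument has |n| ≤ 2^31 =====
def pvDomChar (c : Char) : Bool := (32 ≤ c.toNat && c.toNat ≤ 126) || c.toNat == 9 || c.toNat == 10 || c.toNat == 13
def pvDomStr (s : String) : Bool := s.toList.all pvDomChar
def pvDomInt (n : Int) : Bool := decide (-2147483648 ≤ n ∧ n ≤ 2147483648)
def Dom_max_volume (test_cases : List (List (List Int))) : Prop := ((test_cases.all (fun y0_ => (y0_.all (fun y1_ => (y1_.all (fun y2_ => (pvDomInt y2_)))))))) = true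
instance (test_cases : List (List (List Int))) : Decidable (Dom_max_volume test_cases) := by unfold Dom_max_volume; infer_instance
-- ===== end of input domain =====

-- B replaces A's per-cell stack DFS with a shared visited set by a single row-major
-- merge pass (incremental connected-component labeling); same results, alternative algorithm.

-- ===== PORT A =====

-- grid[x][y]; at every use below the indices are in range under Pre_, so the
-- `.getD 0` default is never taken there.
def pvCell (g : List (List Int)) (x y : Int) : Int :=
  ((PySem.List.pyGet? g x).bind (fun row => PySem.List.pyGet? row y)).getD 0

-- len(grid[0]); grid ≠ [] under Pre_, so the `.getD []` default is never taken there.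
def pvM (g : List (List Int)) : Int :=
  PySem.List.len ((PySem.List.pyGet? g 0).getD [])

-- `0 <= x < len(grid) and 0 <= y < len(grid[0])`
def pvInB (g : List (List Int)) (p : Int × Int) : Bool :=
  decide (0 ≤ p.1) && decide (p.1 < PySem.List.len g) &&
  decide (0 ≤ p.2) && decide (p.2 < pvM g)

def pvDirs : List (Int × Int) := [(-1, 0), (1, 0), (0, -1), (0, 1)]

-- all in-bounds cells in row-major order (used only for the termination measure
-- of dfsLoop and in the proofs below)
def pvCellList (g : List (List Int)) : List (Int × Int) :=
  (PySem.List.pyRange 0 (PySem.List.len g) 1).flatMap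
    (fun i => (PySem.List.pyRange 0 (pvM g) 1).map (fun j => (i, j)))

-- termination helpers for dfsLoop (cited by its decreasing_by)
theorem pv_filter_lt {α : Type} [BEq α] [LawfulBEq α] (l s : List α) (a : α)
    (ha : a ∈ l) (hna : s.contains a = false) :
    (l.filter (fun c => !(s ++ [a]).contains c)).length
      < (l.filter (fun c => !s.contains c)).length := by
  have hpt : ∀ c : α, (!(s ++ [a]).contains c) = ((!(c == a)) && (!s.contains c)) := by
    intro c
    simp only [List.contains_append, Bool.not_or, List.contains_cons,
      List.contains_nil, Bool.or_false]
    rw [Bool.and_comm]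
  rw [List.filter_congr (fun c _ => hpt c), ← List.filter_filter]
  apply List.length_filter_lt_length_iff_exists.mpr
  refine ⟨a, List.mem_filter.mpr ⟨ha, by simpa using hna⟩, by simp⟩

theorem pv_mem_cellList (g : List (List Int)) (p : Int × Int)
    (h : pvInB g p = true) : p ∈ pvCellList g := by
  obtain ⟨x, y⟩ := p
  simp only [pvInB, Bool.and_eq_true, decide_eq_true_eq] at h
  simp only [pvCellList, List.mem_flatMap, List.mem_map]
  exact ⟨x, by rw [PySem.List.mem_pyRange_one]; exact ⟨h.1.1.1, h.1.1.2⟩,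
         y, by rw [PySem.List.mem_pyRange_one]; exact ⟨h.1.2, h.2⟩, rfl⟩

-- the `while stack:` loop of dfs.  The `pvInB` test is only a totality guard:
-- every cell ever on the stack is in bounds when called from max_volume.
def dfsLoop (g : List (List Int)) (stack : List (Int × Int))
    (visited : PySem.Set (Int × Int)) (volume : Int) : Int × PySem.Set (Int × Int) :=
  match stack with
  | [] => (volume, visited)
  | (x, y) :: rest =>
    if hv : visited.contains (x, y) then dfsLoop g rest visited volume
    else if hb : pvInB g (x, y) = true then
      let visited' := PySem.Set.add visited (x, y)
      let volume' := volume + pvCell g x y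
      let pushes := pvDirs.filterMap (fun d =>
        let q := (x + d.1, y + d.2)
        if pvInB g q && decide (0 < pvCell g q.1 q.2) && !(visited'.contains q)
        then some q else none)
      dfsLoop g (pushes.foldl (fun s q => q :: s) rest) visited' volume'
    else dfsLoop g rest visited volume  -- totality guard; unreachable from max_volume
termination_by (((pvCellList g).filter (fun c => !visited.contains c)).length, stack.length)
decreasing_by
  · exact Prod.Lex.right _ (Nat.lt_succ_self _)
  · apply Prod.Lex.left
    have hmem : (x, y) ∈ pvCellList g := pv_mem_cellList g (x, y) hb
    have hno : visited.contains (x, y) = false := by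
      simpa using hv
    have : PySem.Set.add visited (x, y) = visited ++ [(x, y)] :=
      PySem.Set.add_of_not_mem (by simpa using hno)
    rw [this]
    exact pv_filter_lt _ _ _ hmem hno
  · exact Prod.Lex.right _ (Nat.lt_succ_self _)

def dfs (g : List (List Int)) (visited : PySem.Set (Int × Int)) (i j : Int) :
    Int × PySem.Set (Int × Int) :=
  dfsLoop g [(i, j)] visited 0

-- the body of A's `for grid in test_cases:` loop
def processA (g : List (List Int)) : Int :=
  ((PySem.List.pyRange 0 (PySem.List.len g) 1).foldl (fun st i =>
    (PySem.List.pyRange 0 (pvM g) 1).foldl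
      (fun (st : Int × PySem.Set (Int × Int)) j =>
        if 0 < pvCell g i j && !(st.2.contains (i, j)) then
          let r := dfs g st.2 i j
          (max st.1 r.1, r.2)
        else st) st) ((0 : Int), PySem.Set.empty)).1

def max_volume (test_cases : List (List (List Int))) : List Int :=
  test_cases.foldl (fun results grid => results ++ [processA grid]) []

-- ===== PORT B =====

-- the body of B's `for grid in test_cases:` loop
def processB (g : List (List Int)) : Int :=
  let comps := (PySem.List.pyRange 0 (PySem.List.len g) 1).foldl (fun comps i =>
    (PySem.List.pyRange 0 (pvM g) 1).foldl
      (fun (comps : List (PySem.Set (Int × Int) × Int)) j =>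
        let v := pvCell g i j
        if 0 < v then
          let acc := comps.foldl
            (fun (acc : (PySem.Set (Int × Int) × Int) × List (PySem.Set (Int × Int) × Int)) ct =>
              if ct.1.contains (i - 1, j) || ct.1.contains (i, j - 1) then
                ((PySem.Set.union acc.1.1 ct.1, acc.1.2 + ct.2), acc.2)
              else (acc.1, acc.2 ++ [ct]))
            ((PySem.Set.ofList [(i, j)], v), [])
          acc.2 ++ [acc.1]
        else comps) comps) []
  comps.foldl (fun best ct => if best < ct.2 then ct.2 else best) 0

def max_volume_alt (test_cases : List (List (List Int))) : List Int :=
  test_cases.foldl (fun results grid => results ++ [processB grid]) []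

-- ===== PRECONDITION & SPEC =====

-- Exactly the inputs where Python A returns: on an empty grid `grid[0]` raises
-- IndexError, and on a row shorter than len(grid[0]) some `grid[i][j]` raises.
def Pre_max_volume (test_cases : List (List (List Int))) : Prop :=
  ∀ g ∈ test_cases, g ≠ [] ∧ ∀ row ∈ g, (g.headD []).length ≤ row.length
instance (test_cases : List (List (List Int))) : Decidable (Pre_max_volume test_cases) := by
  unfold Pre_max_volume; infer_instance

def pvWitness_max_volume : List (List (List Int)) := [[[1, 2], [0, 3]], [[-1]]]

def Spec_max_volume (test_cases : List (List (List Int))) (out : List Int) : Prop :=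
  out = max_volume_alt test_cases
instance (test_cases : List (List (List Int))) (out : List Int) :
    Decidable (Spec_max_volume test_cases out) := by unfold Spec_max_volume; infer_instance

-- ===== CLAIM (what is proved, stated in full; the proofs are below) =====
def Claim_equal_max_volume : Prop :=
  ∀ (test_cases : List (List (List Int))), Dom_max_volume test_cases →
    Pre_max_volume test_cases → Spec_max_volume test_cases (max_volume test_cases)

-- ===== LEMMAS AND PROOFS =====

-- ---- abstract graph notions ----

def pvVal (g : List (List Int)) (p : Int × Int) : Int := pvCell g p.1 p.2

def PosB (g : List (List Int)) (p : Int × Int) : Bool :=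
  pvInB g p && decide (0 < pvVal g p)

def PosP (g : List (List Int)) (p : Int × Int) : Prop :=
  pvInB g p = true ∧ 0 < pvVal g p

theorem posB_iff (g : List (List Int)) (p : Int × Int) :
    PosB g p = true ↔ PosP g p := by
  simp [PosB, PosP]

def AdjP (g : List (List Int)) (p q : Int × Int) : Prop :=
  PosP g p ∧ PosP g q ∧
    ((p.1 = q.1 ∧ (q.2 = p.2 + 1 ∨ p.2 = q.2 + 1)) ∨
     (p.2 = q.2 ∧ (q.1 = p.1 + 1 ∨ p.1 = q.1 + 1)))

def Reach (g : List (List Int)) : Int × Int → Int × Int → Prop :=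
  Relation.ReflTransGen (AdjP g)

def vsum (g : List (List Int)) (l : List (Int × Int)) : Int :=
  (l.map (pvVal g)).sum

noncomputable def classSum (g : List (List Int)) (p : Int × Int) : Int :=
  vsum g ((pvCellList g).filter (fun q => @decide (Reach g p q) (Classical.propDecidable _)))

def listMax0 (l : List Int) : Int := l.foldl max 0

def rmLt (p q : Int × Int) : Prop := p.1 < q.1 ∨ (p.1 = q.1 ∧ p.2 < q.2)

theorem adj_symm {g : List (List Int)} {p q : Int × Int} (h : AdjP g p q) : AdjP g q p := by
  obtain ⟨hp, hq, hco⟩ := h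
  exact ⟨hq, hp, by omega⟩

theorem reach_symm {g : List (List Int)} {p q : Int × Int} (h : Reach g p q) : Reach g q p :=
  (Relation.ReflTransGen.symmetric (fun _ _ => adj_symm)) h

theorem reach_pos {g : List (List Int)} {p q : Int × Int} (h : Reach g p q)
    (hp : PosP g p) : PosP g q := by
  induction h with
  | refl => exact hp
  | tail _ e _ => exact e.2.1

theorem mem_cellList_iff (g : List (List Int)) (p : Int × Int) :
    p ∈ pvCellList g ↔ pvInB g p = true := by
  constructor
  · intro h
    obtain ⟨x, y⟩ := p
    simp only [pvCellList, List.mem_flatMap, List.mem_map] at h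
    obtain ⟨i, hi, j, hj, hp⟩ := h
    rw [PySem.List.mem_pyRange_one] at hi hj
    cases hp
    simp only [pvInB, Bool.and_eq_true, decide_eq_true_eq]
    exact ⟨⟨⟨hi.1, hi.2⟩, hj.1⟩, hj.2⟩
  · exact pv_mem_cellList g p

theorem cellList_pairwise (g : List (List Int)) : (pvCellList g).Pairwise rmLt := by
  unfold pvCellList
  apply List.pairwise_flatMap.mpr
  constructor
  · intro a _
    apply List.pairwise_map.mpr
    apply (PySem.List.pairwise_lt_pyRange_one 0 (pvM g)).imp
    intro x y h
    exact Or.inr ⟨rfl, h⟩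
  · apply (PySem.List.pairwise_lt_pyRange_one 0 (PySem.List.len g)).imp
    intro i i' hii x hx y hy
    simp only [List.mem_map] at hx hy
    obtain ⟨j, _, rfl⟩ := hx
    obtain ⟨j', _, rfl⟩ := hy
    exact Or.inl hii

theorem cellList_nodup (g : List (List Int)) : (pvCellList g).Nodup := by
  refine (cellList_pairwise g).imp ?_
  intro a b h
  intro hab
  subst hab
  rcases h with h | ⟨h1, h2⟩ <;> omega

theorem closed_reach {g : List (List Int)} {V : List (Int × Int)} {p q : Int × Int}
    (hcl : ∀ c ∈ V, ∀ r, AdjP g c r → r ∈ V) (hp : p ∈ V) (h : Reach g p q) : q ∈ V := by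
  induction h with
  | refl => exact hp
  | tail _ e ih => exact hcl _ ih _ e

-- neighbours of a cell
theorem adj_nbr {g : List (List Int)} {p q : Int × Int} (h : AdjP g p q) :
    q = (p.1 - 1, p.2) ∨ q = (p.1 + 1, p.2) ∨ q = (p.1, p.2 - 1) ∨ q = (p.1, p.2 + 1) := by
  obtain ⟨_, _, hco⟩ := h
  obtain ⟨qa, qb⟩ := q
  simp only [Prod.mk.injEq]
  omega

theorem nbr_adj {g : List (List Int)} {p q : Int × Int} (hp : PosP g p) (hq : PosP g q)
    (h : q = (p.1 - 1, p.2) ∨ q = (p.1 + 1, p.2) ∨ q = (p.1, p.2 - 1) ∨ q = (p.1, p.2 + 1)) :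
    AdjP g p q := by
  refine ⟨hp, hq, ?_⟩
  obtain ⟨qa, qb⟩ := q
  simp only [Prod.mk.injEq] at h
  omega

-- ---- listMax0 ----

theorem le_foldl_max (l : List Int) : ∀ (i : Int), i ≤ l.foldl max i := by
  induction l with
  | nil => intro i; simp
  | cons x xs ih => intro i; exact le_trans (le_max_left i x) (ih (max i x))

theorem listMax0_nonneg (l : List Int) : 0 ≤ listMax0 l := le_foldl_max l 0

theorem le_foldl_max_mem : ∀ (l : List Int) (i x : Int), x ∈ l → x ≤ l.foldl max i := by
  intro l
  induction l with
  | nil => intro i x h; cases h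
  | cons y ys ih =>
    intro i x h
    rcases List.mem_cons.mp h with rfl | h'
    · exact le_trans (le_max_right i x) (le_foldl_max ys _)
    · exact ih _ x h'

theorem le_listMax0 {l : List Int} {x : Int} (h : x ∈ l) : x ≤ listMax0 l :=
  le_foldl_max_mem l 0 x h

theorem foldl_max_le : ∀ (l : List Int) (i c : Int), i ≤ c → (∀ x ∈ l, x ≤ c) →
    l.foldl max i ≤ c := by
  intro l
  induction l with
  | nil => intro i c hi _; simpa using hi
  | cons y ys ih =>
    intro i c hi h
    exact ih _ c (max_le hi (h y List.mem_cons_self)) (fun x hx => h x (List.mem_cons_of_mem _ hx))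

theorem listMax0_le {l : List Int} {c : Int} (h0 : 0 ≤ c) (h : ∀ x ∈ l, x ≤ c) :
    listMax0 l ≤ c :=
  foldl_max_le l 0 c h0 h

theorem listMax0_append (l : List Int) (a : Int) :
    listMax0 (l ++ [a]) = max (listMax0 l) a := by
  simp [listMax0, List.foldl_append]

-- ---- sums over component lists ----

theorem vsum_append (g : List (List Int)) (l l' : List (Int × Int)) :
    vsum g (l ++ l') = vsum g l + vsum g l' := by
  simp [vsum]

theorem vsum_perm {g : List (List Int)} {l l' : List (Int × Int)} (h : l.Perm l') :
    vsum g l = vsum g l' := by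
  unfold vsum
  exact List.Perm.sum_eq (h.map _)

theorem vsum_eq_of_nodup_memiff {g : List (List Int)} {l l' : List (Int × Int)}
    (hn : l.Nodup) (hn' : l'.Nodup) (h : ∀ q, q ∈ l ↔ q ∈ l') :
    vsum g l = vsum g l' := by
  exact vsum_perm ((List.perm_ext_iff_of_nodup hn hn').mpr h)

theorem vsum_eq_classSum {g : List (List Int)} {L : List (Int × Int)} {p : Int × Int}
    (hN : L.Nodup) (hp : PosP g p) (hiff : ∀ q, q ∈ L ↔ Reach g p q) :
    vsum g L = classSum g p := by
  unfold classSum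
  apply vsum_eq_of_nodup_memiff hN ((cellList_nodup g).filter _)
  intro q
  rw [hiff q, List.mem_filter]
  constructor
  · intro hr
    refine ⟨(mem_cellList_iff g q).mpr (reach_pos hr hp).1, ?_⟩
    exact (@decide_eq_true_iff _ (Classical.propDecidable _)).mpr hr
  · intro ⟨_, hd⟩
    exact (@decide_eq_true_iff _ (Classical.propDecidable _)).mp hd

theorem classSum_congr {g : List (List Int)} {p p' : Int × Int}
    (h : Reach g p p') : classSum g p = classSum g p' := by
  unfold classSum
  congr 1
  apply List.filter_congr
  intro q _
  have : Reach g p q ↔ Reach g p' q :=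
    ⟨fun hh => Relation.ReflTransGen.trans (reach_symm h) hh,
     fun hh => Relation.ReflTransGen.trans h hh⟩
  simp only [decide_eq_decide]
  exact this

-- ---- the dfs loop ----

theorem foldl_cons_eq (l init : List (Int × Int)) :
    l.foldl (fun s q => q :: s) init = l.reverse ++ init := by
  induction l generalizing init with
  | nil => simp
  | cons x xs ih => simp [ih]

theorem mem_pushes {g : List (List Int)} {x y : Int} {vis : List (Int × Int)} {q : Int × Int} :
    q ∈ pvDirs.filterMap (fun d =>
        if pvInB g (x + d.1, y + d.2) && decide (0 < pvCell g (x + d.1) (y + d.2))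
            && !(vis.contains (x + d.1, y + d.2))
        then some (x + d.1, y + d.2) else none) ↔
      ((q = (x - 1, y) ∨ q = (x + 1, y) ∨ q = (x, y - 1) ∨ q = (x, y + 1)) ∧
        pvInB g q = true ∧ 0 < pvVal g q ∧ q ∉ vis) := by
  rw [List.mem_filterMap]
  constructor
  · rintro ⟨d, hd, hsome⟩
    have hds : d = (-1, 0) ∨ d = (1, 0) ∨ d = (0, -1) ∨ d = (0, 1) := by
      simpa [pvDirs] using hd
    rw [Option.ite_none_right_eq_some, Option.some.injEq] at hsome
    obtain ⟨hC, heq⟩ := hsome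
    subst heq
    simp only [Bool.and_eq_true, decide_eq_true_eq, Bool.not_eq_true'] at hC
    have hnb : ((x + d.1, y + d.2) : Int × Int) = (x - 1, y) ∨ (x + d.1, y + d.2) = (x + 1, y)
        ∨ (x + d.1, y + d.2) = (x, y - 1) ∨ (x + d.1, y + d.2) = (x, y + 1) := by
      rcases hds with rfl | rfl | rfl | rfl
      · exact Or.inl (by show ((x + -1 : Int), (y + 0 : Int)) = (x - 1, y); exact Prod.ext (by omega) (by omega))
      · exact Or.inr (Or.inl (by show ((x + 1 : Int), (y + 0 : Int)) = (x + 1, y); exact Prod.ext (by omega) (by omega)))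
      · exact Or.inr (Or.inr (Or.inl (by show ((x + 0 : Int), (y + -1 : Int)) = (x, y - 1); exact Prod.ext (by omega) (by omega))))
      · exact Or.inr (Or.inr (Or.inr (by show ((x + 0 : Int), (y + 1 : Int)) = (x, y + 1); exact Prod.ext (by omega) (by omega))))
    exact ⟨hnb, hC.1.1, hC.1.2, by simpa using hC.2⟩
  · rintro ⟨hq, hin, hv, hnm⟩
    have hnc : vis.contains q = false := by simpa using hnm
    rcases hq with rfl | rfl | rfl | rfl
    · refine ⟨(-1, 0), by simp [pvDirs], ?_⟩
      rw [Option.ite_none_right_eq_some, Option.some.injEq]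
      simp only [show x + (-1 : Int) = x - 1 from by ring, show y + (0 : Int) = y from by ring]
      have hv' : 0 < pvCell g (x - 1) y := hv
      simp [hin, hnm, hv']
    · refine ⟨(1, 0), by simp [pvDirs], ?_⟩
      rw [Option.ite_none_right_eq_some, Option.some.injEq]
      simp only [show y + (0 : Int) = y from by ring]
      have hv' : 0 < pvCell g (x + 1) y := hv
      simp [hin, hnm, hv']
    · refine ⟨(0, -1), by simp [pvDirs], ?_⟩
      rw [Option.ite_none_right_eq_some, Option.some.injEq]
      simp only [show x + (0 : Int) = x from by ring, show y + (-1 : Int) = y - 1 from by ring]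
      have hv' : 0 < pvCell g x (y - 1) := hv
      simp [hin, hnm, hv']
    · refine ⟨(0, 1), by simp [pvDirs], ?_⟩
      rw [Option.ite_none_right_eq_some, Option.some.injEq]
      simp only [show x + (0 : Int) = x from by ring]
      have hv' : 0 < pvCell g x (y + 1) := hv
      simp [hin, hnm, hv']

theorem dfsLoop_spec (g : List (List Int)) (p : Int × Int) :
    ∀ (stack : List (Int × Int)) (visited : PySem.Set (Int × Int)) (volume : Int),
      visited.Nodup →
      (∀ q ∈ stack, PosP g q) →
      (∀ q ∈ stack, Reach g p q) →
      ∃ Δ : List (Int × Int),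
        (dfsLoop g stack visited volume).2 = visited ++ Δ ∧
        (visited ++ Δ).Nodup ∧
        (∀ q ∈ Δ, PosP g q ∧ Reach g p q) ∧
        (∀ q ∈ stack, q ∈ (dfsLoop g stack visited volume).2) ∧
        (∀ c ∈ Δ, ∀ q, AdjP g c q → q ∈ (dfsLoop g stack visited volume).2) ∧
        (dfsLoop g stack visited volume).1 = volume + vsum g Δ := by
  intro stack visited volume
  induction stack, visited, volume using dfsLoop.induct g with
  | case1 visited volume =>
    intro hN _ _
    have hstep : dfsLoop g [] visited volume = (volume, visited) := by rw [dfsLoop]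
    exact ⟨[], by simp [hstep], by simpa using hN, by simp, by simp, by simp,
      by simp [hstep, vsum]⟩
  | case2 visited volume x y rest hv ih =>
    intro hN hPos hReach
    have hstep : dfsLoop g ((x, y) :: rest) visited volume = dfsLoop g rest visited volume := by
      rw [dfsLoop, dif_pos hv]
    obtain ⟨Δ, h1, h2, h3, h4, h5, h6⟩ :=
      ih hN (fun q hq => hPos q (List.mem_cons_of_mem _ hq))
        (fun q hq => hReach q (List.mem_cons_of_mem _ hq))
    rw [hstep]
    refine ⟨Δ, h1, h2, h3, ?_, h5, h6⟩
    intro q hq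
    rcases List.mem_cons.mp hq with rfl | hq'
    · rw [h1]; exact List.mem_append_left _ (by simpa using hv)
    · exact h4 q hq'
  | case3 visited volume x y rest hv hb evis evol epush ih =>
    intro hN hPos hReach
    have hxyPos : PosP g (x, y) := hPos _ List.mem_cons_self
    have hxyReach : Reach g p (x, y) := hReach _ List.mem_cons_self
    have hnm : (x, y) ∉ visited := by simpa using hv
    have hadd : PySem.Set.add visited (x, y) = visited ++ [(x, y)] :=
      PySem.Set.add_of_not_mem hnm
    have hevis : evis = visited ++ [(x, y)] := hadd
    have hpush_iff : ∀ q : Int × Int, q ∈ epush ↔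
        ((q = (x - 1, y) ∨ q = (x + 1, y) ∨ q = (x, y - 1) ∨ q = (x, y + 1)) ∧
          pvInB g q = true ∧ 0 < pvVal g q ∧ q ∉ PySem.Set.add visited (x, y)) :=
      fun _ => mem_pushes
    have hstack_iff : ∀ q : Int × Int,
        q ∈ epush.foldl (fun s q => q :: s) rest ↔ q ∈ epush ∨ q ∈ rest := by
      intro q; rw [foldl_cons_eq, List.mem_append, List.mem_reverse]
    obtain ⟨Δ, h1, h2, h3, h4, h5, h6⟩ := ih
      (show (PySem.Set.add visited (x, y)).Nodup from PySem.Set.nodup_add visited (x, y) hN)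
      (by
        intro q hq
        rcases (hstack_iff q).mp hq with hq' | hq'
        · obtain ⟨_, hin, hval, _⟩ := (hpush_iff q).mp hq'
          exact ⟨hin, hval⟩
        · exact hPos q (List.mem_cons_of_mem _ hq'))
      (by
        intro q hq
        rcases (hstack_iff q).mp hq with hq' | hq'
        · obtain ⟨hoff, hin, hval, _⟩ := (hpush_iff q).mp hq'
          exact Relation.ReflTransGen.tail hxyReach (nbr_adj hxyPos ⟨hin, hval⟩ hoff)
        · exact hReach q (List.mem_cons_of_mem _ hq'))
    have hstep : dfsLoop g ((x, y) :: rest) visited volume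
        = dfsLoop g (epush.foldl (fun s q => q :: s) rest) evis evol := by
      rw [dfsLoop, dif_neg hv, dif_pos hb]; rfl
    rw [hstep]
    rw [hevis] at h2
    refine ⟨(x, y) :: Δ, ?_, ?_, ?_, ?_, ?_, ?_⟩
    · rw [h1, hevis]; simp
    · simpa [List.append_assoc] using h2
    · intro q hq
      rcases List.mem_cons.mp hq with rfl | hq'
      · exact ⟨hxyPos, hxyReach⟩
      · exact h3 q hq'
    · intro q hq
      rcases List.mem_cons.mp hq with rfl | hq'
      · rw [h1, hevis]; simp
      · exact h4 q ((hstack_iff q).mpr (Or.inr hq'))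
    · intro c hc q hadj
      rcases List.mem_cons.mp hc with rfl | hc'
      · have hqpos : PosP g q := hadj.2.1
        by_cases hqv : q ∈ evis
        · rw [h1]; exact List.mem_append_left _ hqv
        · apply h4 q
          apply (hstack_iff q).mpr
          exact Or.inl ((hpush_iff q).mpr ⟨adj_nbr hadj, hqpos.1, hqpos.2, hqv⟩)
      · exact h5 c hc' q hadj
    · rw [h6]
      show volume + pvCell g x y + vsum g Δ = volume + vsum g ((x, y) :: Δ)
      simp only [vsum, List.map_cons, List.sum_cons]
      have hval : pvVal g (x, y) = pvCell g x y := rfl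
      rw [hval]; ring
  | case4 visited volume x y rest hv hb ih =>
    intro _ hPos _
    exact absurd (hPos _ List.mem_cons_self).1 hb

theorem dfs_spec {g : List (List Int)} {p : Int × Int} {visited : PySem.Set (Int × Int)}
    (hN : visited.Nodup) (hcl : ∀ c ∈ visited, ∀ q, AdjP g c q → q ∈ visited)
    (hp : PosP g p) (hnv : p ∉ visited) :
    ∃ Δ : List (Int × Int),
      (dfs g visited p.1 p.2).2 = visited ++ Δ ∧
      (visited ++ Δ).Nodup ∧
      (∀ q, q ∈ Δ ↔ Reach g p q) ∧
      (dfs g visited p.1 p.2).1 = classSum g p := by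
  obtain ⟨Δ, h1, h2, h3, h4, h5, h6⟩ := dfsLoop_spec g p [p] visited 0 hN
    (by intro q hq; rcases List.mem_singleton.mp hq with rfl; exact hp)
    (by intro q hq; rcases List.mem_singleton.mp hq with rfl; exact Relation.ReflTransGen.refl)
  have he : dfs g visited p.1 p.2 = dfsLoop g [p] visited 0 := rfl
  have hful : ∀ r, Reach g p r → r ∈ visited ++ Δ := by
    intro r hr
    induction hr with
    | refl => rw [← h1]; exact h4 p List.mem_cons_self
    | tail _ e ih =>
      rcases List.mem_append.mp ih with hbv | hbΔ
      · exact List.mem_append_left _ (hcl _ hbv _ e)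
      · have h := h5 _ hbΔ _ e; rw [h1] at h; exact h
  have hiff : ∀ q, q ∈ Δ ↔ Reach g p q := by
    intro q
    constructor
    · exact fun hq => (h3 q hq).2
    · intro hr
      rcases List.mem_append.mp (hful q hr) with hqv | hqΔ
      · exact absurd (closed_reach hcl hqv (reach_symm hr)) hnv
      · exact hqΔ
  have hΔN : Δ.Nodup := (List.nodup_append.mp h2).2.1
  refine ⟨Δ, by rw [he]; exact h1, h2, hiff, ?_⟩
  rw [he, h6, zero_add]
  exact vsum_eq_classSum hΔN hp hiff

-- ---- flattening the nested loops ----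

theorem foldl_foldl_product {σ : Type} (f : σ → Int × Int → σ) (l1 l2 : List Int) (init : σ) :
    l1.foldl (fun s i => l2.foldl (fun s j => f s (i, j)) s) init
      = (l1.flatMap (fun i => l2.map (fun j => (i, j)))).foldl f init := by
  induction l1 generalizing init with
  | nil => simp
  | cons i l ih => simp [List.foldl_append, List.foldl_map, ih]

def stepA (g : List (List Int)) (st : Int × PySem.Set (Int × Int)) (c : Int × Int) :
    Int × PySem.Set (Int × Int) :=
  if 0 < pvCell g c.1 c.2 && !(st.2.contains c) then
    let r := dfs g st.2 c.1 c.2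
    (max st.1 r.1, r.2)
  else st

theorem processA_eq_fold (g : List (List Int)) :
    processA g = ((pvCellList g).foldl (stepA g) ((0 : Int), PySem.Set.empty)).1 := by
  exact congrArg Prod.fst
    (foldl_foldl_product (stepA g) (PySem.List.pyRange 0 (PySem.List.len g) 1)
      (PySem.List.pyRange 0 (pvM g) 1) ((0 : Int), PySem.Set.empty))

def stepB (g : List (List Int)) (comps : List (PySem.Set (Int × Int) × Int)) (c : Int × Int) :
    List (PySem.Set (Int × Int) × Int) :=
  let v := pvCell g c.1 c.2
  if 0 < v then
    let acc := comps.foldl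
      (fun (acc : (PySem.Set (Int × Int) × Int) × List (PySem.Set (Int × Int) × Int)) ct =>
        if ct.1.contains (c.1 - 1, c.2) || ct.1.contains (c.1, c.2 - 1) then
          ((PySem.Set.union acc.1.1 ct.1, acc.1.2 + ct.2), acc.2)
        else (acc.1, acc.2 ++ [ct]))
      ((PySem.Set.ofList [c], v), [])
    acc.2 ++ [acc.1]
  else comps

theorem processB_eq_fold (g : List (List Int)) :
    processB g = ((pvCellList g).foldl (stepB g) []).foldl
      (fun best ct => if best < ct.2 then ct.2 else best) 0 := by
  exact congrArg (fun l => l.foldl (fun (best : Int) (ct : PySem.Set (Int × Int) × Int) =>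
      if best < ct.2 then ct.2 else best) 0)
    (foldl_foldl_product (stepB g) (PySem.List.pyRange 0 (PySem.List.len g) 1)
      (PySem.List.pyRange 0 (pvM g) 1) [])

-- ---- the A-side loop invariant ----

def InvA (g : List (List Int)) (P : List (Int × Int)) (st : Int × PySem.Set (Int × Int)) : Prop :=
  st.2.Nodup ∧
  (∀ c ∈ st.2, ∀ q, AdjP g c q → q ∈ st.2) ∧
  (∀ q, q ∈ st.2 ↔ ∃ p ∈ P, PosP g p ∧ Reach g p q) ∧
  st.1 = listMax0 ((P.filter (PosB g)).map (classSum g))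

theorem stepA_preserve {g : List (List Int)} {P : List (Int × Int)} {p : Int × Int}
    {st : Int × PySem.Set (Int × Int)} (hInv : InvA g P st) (hb : pvInB g p = true) :
    InvA g (P ++ [p]) (stepA g st p) := by
  obtain ⟨hN, hcl, hmem, hmx⟩ := hInv
  by_cases hpos : 0 < pvCell g p.1 p.2
  · have hPosP : PosP g p := ⟨hb, hpos⟩
    have hPosB : PosB g p = true := (posB_iff g p).mpr hPosP
    by_cases hvis : p ∈ st.2
    · have hstep : stepA g st p = st := by
        simp [stepA, hpos, hvis]
      rw [hstep]
      refine ⟨hN, hcl, ?_, ?_⟩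
      · intro q
        rw [hmem q]
        constructor
        · rintro ⟨p', hp', hq⟩
          exact ⟨p', List.mem_append_left _ hp', hq⟩
        · rintro ⟨p', hp', hpos', hre⟩
          rcases List.mem_append.mp hp' with hP | hsing
          · exact ⟨p', hP, hpos', hre⟩
          · rcases List.mem_singleton.mp hsing with rfl
            have hq : q ∈ st.2 := closed_reach hcl hvis hre
            exact (hmem q).mp hq
      · rw [List.filter_append, List.filter_singleton]
        simp only [hPosB, cond_true]
        rw [List.map_append, List.map_singleton, listMax0_append]
        obtain ⟨p', hP, hpos', hre⟩ := (hmem p).mp hvis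
        have hcs : classSum g p = classSum g p' := classSum_congr (reach_symm hre)
        have hle : classSum g p ≤ listMax0 ((P.filter (PosB g)).map (classSum g)) := by
          rw [hcs]
          exact le_listMax0 (List.mem_map_of_mem
            (List.mem_filter.mpr ⟨hP, (posB_iff g p').mpr hpos'⟩))
        rw [hmx]
        exact (max_eq_left hle).symm
    · have hstep : stepA g st p = (max st.1 (dfs g st.2 p.1 p.2).1, (dfs g st.2 p.1 p.2).2) := by
        simp [stepA, hpos, hvis]
      obtain ⟨Δ, hd1, hd2, hd3, hd4⟩ := dfs_spec hN hcl hPosP hvis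
      rw [hstep]
      refine ⟨?_, ?_, ?_, ?_⟩
      · show (dfs g st.2 p.1 p.2).2.Nodup
        rw [hd1]; exact hd2
      · show ∀ c ∈ (dfs g st.2 p.1 p.2).2, _
        rw [hd1]
        intro c hc q hadj
        rcases List.mem_append.mp hc with hcv | hcΔ
        · exact List.mem_append_left _ (hcl c hcv q hadj)
        · refine List.mem_append_right _ ((hd3 q).mpr ?_)
          exact Relation.ReflTransGen.tail ((hd3 c).mp hcΔ) hadj
      · intro q
        show q ∈ (dfs g st.2 p.1 p.2).2 ↔ _
        rw [hd1, List.mem_append, hmem q, hd3 q]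
        constructor
        · rintro (⟨p', hP, hpos', hre⟩ | hre)
          · exact ⟨p', List.mem_append_left _ hP, hpos', hre⟩
          · exact ⟨p, List.mem_append_right _ List.mem_cons_self, hPosP, hre⟩
        · rintro ⟨p', hp', hpos', hre⟩
          rcases List.mem_append.mp hp' with hP | hsing
          · exact Or.inl ⟨p', hP, hpos', hre⟩
          · rcases List.mem_singleton.mp hsing with rfl
            exact Or.inr hre
      · show max st.1 (dfs g st.2 p.1 p.2).1 = _
        rw [hd4, hmx, List.filter_append, List.filter_singleton]
        simp only [hPosB, cond_true]
        rw [List.map_append, List.map_singleton, listMax0_append]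
  · have hnPosB : PosB g p = false := by
      simp only [PosB, pvVal, Bool.and_eq_false_iff, decide_eq_false_iff_not]
      exact Or.inr hpos
    have hstep : stepA g st p = st := by
      simp [stepA, hpos]
    rw [hstep]
    refine ⟨hN, hcl, ?_, ?_⟩
    · intro q
      rw [hmem q]
      constructor
      · rintro ⟨p', hp', hq⟩
        exact ⟨p', List.mem_append_left _ hp', hq⟩
      · rintro ⟨p', hp', hpos', hre⟩
        rcases List.mem_append.mp hp' with hP | hsing
        · exact ⟨p', hP, hpos', hre⟩
        · rcases List.mem_singleton.mp hsing with rfl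
          exact absurd hpos' (fun h => hpos h.2)
    · rw [List.filter_append, List.filter_singleton]
      simp only [hnPosB, cond_false]
      simpa using hmx

theorem foldl_invA {g : List (List Int)} :
    ∀ (suffix P : List (Int × Int)) (st : Int × PySem.Set (Int × Int)),
      InvA g P st → (∀ c ∈ suffix, pvInB g c = true) →
      InvA g (P ++ suffix) (suffix.foldl (stepA g) st) := by
  intro suffix
  induction suffix with
  | nil => intro P st h _; simpa using h
  | cons p suf ih =>
    intro P st h hin
    have h1 : InvA g (P ++ [p]) (stepA g st p) :=
      stepA_preserve h (hin p (List.mem_cons_self))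
    have h2 := ih (P ++ [p]) (stepA g st p) h1 (fun c hc => hin c (List.mem_cons_of_mem _ hc))
    simpa [List.append_assoc] using h2

theorem processA_eq_max (g : List (List Int)) :
    processA g = listMax0 (((pvCellList g).filter (PosB g)).map (classSum g)) := by
  rw [processA_eq_fold]
  have h0 : InvA g [] ((0 : Int), PySem.Set.empty) := by
    refine ⟨List.nodup_nil, by simp [PySem.Set.empty], by simp [PySem.Set.empty], by simp [listMax0]⟩
  have := foldl_invA (pvCellList g) [] _ h0 (fun c hc => (mem_cellList_iff g c).mp hc)
  simpa using this.2.2.2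

-- ---- the B-side loop invariant ----

def InvB (g : List (List Int)) (P : List (Int × Int))
    (comps : List (PySem.Set (Int × Int) × Int)) : Prop :=
  (∀ ct ∈ comps, ct.1.Nodup ∧ ct.1 ≠ [] ∧ (∀ q ∈ ct.1, q ∈ P ∧ PosP g q) ∧
      (∀ a ∈ ct.1, ∀ b ∈ ct.1, Reach g a b) ∧ ct.2 = vsum g ct.1) ∧
  (∀ q, (q ∈ P ∧ PosP g q) ↔ ∃ ct ∈ comps, q ∈ ct.1) ∧
  comps.Pairwise (fun c c' => (∀ a ∈ c.1, a ∉ c'.1) ∧ (∀ a ∈ c.1, ∀ b ∈ c'.1, ¬ AdjP g a b))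

theorem mergeFold_spec (g : List (List Int)) (i j : Int) :
    ∀ (l : List (PySem.Set (Int × Int) × Int))
      (acc : (PySem.Set (Int × Int) × Int) × List (PySem.Set (Int × Int) × Int)),
      (l.foldl (fun acc ct =>
          if ct.1.contains (i - 1, j) || ct.1.contains (i, j - 1) then
            ((PySem.Set.union acc.1.1 ct.1, acc.1.2 + ct.2), acc.2)
          else (acc.1, acc.2 ++ [ct])) acc).2
        = acc.2 ++ l.filter (fun ct => !(ct.1.contains (i - 1, j) || ct.1.contains (i, j - 1))) ∧
      (∀ q, q ∈ (l.foldl (fun acc ct =>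
          if ct.1.contains (i - 1, j) || ct.1.contains (i, j - 1) then
            ((PySem.Set.union acc.1.1 ct.1, acc.1.2 + ct.2), acc.2)
          else (acc.1, acc.2 ++ [ct])) acc).1.1 ↔
        q ∈ acc.1.1 ∨ ∃ ct ∈ l, (ct.1.contains (i - 1, j) || ct.1.contains (i, j - 1)) = true ∧ q ∈ ct.1) ∧
      ((l.foldl (fun acc ct =>
          if ct.1.contains (i - 1, j) || ct.1.contains (i, j - 1) then
            ((PySem.Set.union acc.1.1 ct.1, acc.1.2 + ct.2), acc.2)
          else (acc.1, acc.2 ++ [ct])) acc).1.2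
        = acc.1.2 + ((l.filter (fun ct => ct.1.contains (i - 1, j) || ct.1.contains (i, j - 1))).map (fun ct => ct.2)).sum) ∧
      (acc.1.1.Nodup → (l.foldl (fun acc ct =>
          if ct.1.contains (i - 1, j) || ct.1.contains (i, j - 1) then
            ((PySem.Set.union acc.1.1 ct.1, acc.1.2 + ct.2), acc.2)
          else (acc.1, acc.2 ++ [ct])) acc).1.1.Nodup) := by
  intro l
  induction l with
  | nil => intro acc; simp
  | cons ct l ih =>
    intro acc
    simp only [List.foldl_cons]
    by_cases ht : (ct.1.contains (i - 1, j) || ct.1.contains (i, j - 1)) = true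
    · rw [if_pos ht]
      obtain ⟨ha, hb, hc, hd⟩ := ih ((PySem.Set.union acc.1.1 ct.1, acc.1.2 + ct.2), acc.2)
      refine ⟨?_, ?_, ?_, ?_⟩
      · rw [ha]
        simp only [List.filter_cons, ht, Bool.not_true, Bool.false_eq_true, if_false]
      · intro q
        rw [hb q, PySem.Set.mem_union]
        constructor
        · rintro ((h | h) | ⟨ct', hmem, hts, hq⟩)
          · exact Or.inl h
          · exact Or.inr ⟨ct, List.mem_cons_self, ht, h⟩
          · exact Or.inr ⟨ct', List.mem_cons_of_mem _ hmem, hts, hq⟩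
        · rintro (h | ⟨ct', hmem, hts, hq⟩)
          · exact Or.inl (Or.inl h)
          · rcases List.mem_cons.mp hmem with rfl | hmem'
            · exact Or.inl (Or.inr hq)
            · exact Or.inr ⟨ct', hmem', hts, hq⟩
      · rw [hc]
        simp only [List.filter_cons, ht, if_true, List.map_cons, List.sum_cons]
        ring
      · intro hnd
        exact hd (PySem.Set.nodup_union acc.1.1 ct.1 hnd)
    · rw [if_neg ht]
      obtain ⟨ha, hb, hc, hd⟩ := ih (acc.1, acc.2 ++ [ct])
      refine ⟨?_, ?_, ?_, ?_⟩
      · rw [ha]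
        have hnt : (!(ct.1.contains (i - 1, j) || ct.1.contains (i, j - 1))) = true := by
          simpa using ht
        simp only [List.filter_cons, hnt, if_true]
        simp
      · intro q
        rw [hb q]
        constructor
        · rintro (h | ⟨ct', hmem, hts, hq⟩)
          · exact Or.inl h
          · exact Or.inr ⟨ct', List.mem_cons_of_mem _ hmem, hts, hq⟩
        · rintro (h | ⟨ct', hmem, hts, hq⟩)
          · exact Or.inl h
          · rcases List.mem_cons.mp hmem with rfl | hmem'
            · exact absurd hts ht
            · exact Or.inr ⟨ct', hmem', hts, hq⟩
      · rw [hc]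
        have htf : (ct.1.contains (i - 1, j) || ct.1.contains (i, j - 1)) = false := by
          simpa using ht
        simp only [List.filter_cons, htf, Bool.false_eq_true, if_false]
      · exact hd

theorem nodup_flatMap_pv {α β : Type} (l : List α) (f : α → List β)
    (h1 : ∀ a ∈ l, (f a).Nodup)
    (h2 : l.Pairwise (fun a b => ∀ x ∈ f a, x ∉ f b)) : (l.flatMap f).Nodup := by
  induction l with
  | nil => simp
  | cons a l ih =>
    rw [List.flatMap_cons, List.nodup_append]
    refine ⟨h1 a List.mem_cons_self, ih (fun b hb => h1 b (List.mem_cons_of_mem _ hb))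
      (List.Pairwise.sublist (List.sublist_cons_self a l) h2), ?_⟩
    intro x hx y hy
    rw [List.mem_flatMap] at hy
    obtain ⟨b, hb, hyb⟩ := hy
    intro heq
    exact (List.pairwise_cons.mp h2).1 b hb x hx (heq ▸ hyb)

theorem vsum_flatMap {α : Type} (g : List (List Int)) (l : List α) (f : α → List (Int × Int)) :
    vsum g (l.flatMap f) = (l.map (fun a => vsum g (f a))).sum := by
  induction l with
  | nil => simp [vsum]
  | cons a l ih => rw [List.flatMap_cons, vsum_append, ih, List.map_cons, List.sum_cons]

theorem stepB_preserve {g : List (List Int)} {P : List (Int × Int)} {p : Int × Int}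
    {comps : List (PySem.Set (Int × Int) × Int)} (hInv : InvB g P comps)
    (hb : pvInB g p = true) (hbefore : ∀ c ∈ P, rmLt c p) :
    InvB g (P ++ [p]) (stepB g comps p) := by
  obtain ⟨hcomp, hglob, hpw⟩ := hInv
  have hpP : p ∉ P := fun h => by
    have := hbefore p h
    rcases this with h' | ⟨_, h'⟩ <;> omega
  have hpairR : Symmetric (fun (c c' : PySem.Set (Int × Int) × Int) =>
      (∀ a ∈ c.1, a ∉ c'.1) ∧ (∀ a ∈ c.1, ∀ b ∈ c'.1, ¬ AdjP g a b)) := by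
    intro c c' ⟨hd, he⟩
    refine ⟨fun a ha hmem => hd a hmem ha, fun a ha b hb hadj => he b hb a ha (adj_symm hadj)⟩
  have hpair : ∀ ct ∈ comps, ∀ ct' ∈ comps, ct ≠ ct' →
      (∀ a ∈ ct.1, a ∉ ct'.1) ∧ (∀ a ∈ ct.1, ∀ b ∈ ct'.1, ¬ AdjP g a b) :=
    fun ct hct ct' hct' hne => hpw.forall hpairR hct hct' hne
  by_cases hpos : 0 < pvCell g p.1 p.2
  · have hPosPp : PosP g p := ⟨hb, hpos⟩
    obtain ⟨ha, hbm, hc, hd⟩ := mergeFold_spec g p.1 p.2 comps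
      ((PySem.Set.ofList [p], pvCell g p.1 p.2), [])
    have hstep : stepB g comps p = (comps.foldl
        (fun (acc : (PySem.Set (Int × Int) × Int) × List (PySem.Set (Int × Int) × Int)) ct =>
          if ct.1.contains (p.1 - 1, p.2) || ct.1.contains (p.1, p.2 - 1) then
            ((PySem.Set.union acc.1.1 ct.1, acc.1.2 + ct.2), acc.2)
          else (acc.1, acc.2 ++ [ct]))
        ((PySem.Set.ofList [p], pvCell g p.1 p.2), [])).2 ++ [(comps.foldl
        (fun (acc : (PySem.Set (Int × Int) × Int) × List (PySem.Set (Int × Int) × Int)) ct =>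
          if ct.1.contains (p.1 - 1, p.2) || ct.1.contains (p.1, p.2 - 1) then
            ((PySem.Set.union acc.1.1 ct.1, acc.1.2 + ct.2), acc.2)
          else (acc.1, acc.2 ++ [ct]))
        ((PySem.Set.ofList [p], pvCell g p.1 p.2), [])).1] := by
      simp only [stepB, if_pos hpos]
    set F := comps.foldl
        (fun (acc : (PySem.Set (Int × Int) × Int) × List (PySem.Set (Int × Int) × Int)) ct =>
          if ct.1.contains (p.1 - 1, p.2) || ct.1.contains (p.1, p.2 - 1) then
            ((PySem.Set.union acc.1.1 ct.1, acc.1.2 + ct.2), acc.2)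
          else (acc.1, acc.2 ++ [ct]))
        ((PySem.Set.ofList [p], pvCell g p.1 p.2), []) with hF
    rw [hstep]
    simp only [List.nil_append] at ha hc
    have hmemC : ∀ q, q ∈ F.1.1 ↔ (q = p ∨ ∃ ct ∈ comps,
        (ct.1.contains (p.1 - 1, p.2) || ct.1.contains (p.1, p.2 - 1)) = true ∧ q ∈ ct.1) := by
      intro q
      rw [hbm q]
      constructor
      · rintro (h | h)
        · exact Or.inl (by simpa [PySem.Set.mem_ofList] using h)
        · exact Or.inr h
      · rintro (rfl | h)
        · exact Or.inl (by simp [PySem.Set.mem_ofList])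
        · exact Or.inr h
    have hndC : F.1.1.Nodup := hd (PySem.Set.nodup_ofList [p])
    have htouch_iff : ∀ ct ∈ comps,
        ((ct.1.contains (p.1 - 1, p.2) || ct.1.contains (p.1, p.2 - 1)) = true ↔
          ∃ c ∈ ct.1, AdjP g c p) := by
      intro ct hct
      constructor
      · intro h
        rcases Bool.or_eq_true_iff.mp h with h' | h'
        · have hm : (p.1 - 1, p.2) ∈ ct.1 := by simpa using h'
          have hPos := ((hcomp ct hct).2.2.1 _ hm).2
          exact ⟨_, hm, adj_symm (nbr_adj hPosPp hPos (Or.inl rfl))⟩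
        · have hm : (p.1, p.2 - 1) ∈ ct.1 := by simpa using h'
          have hPos := ((hcomp ct hct).2.2.1 _ hm).2
          exact ⟨_, hm, adj_symm (nbr_adj hPosPp hPos (Or.inr (Or.inr (Or.inl rfl))))⟩
      · rintro ⟨c, hcm, hadj⟩
        have hcP : c ∈ P := ((hcomp ct hct).2.2.1 _ hcm).1
        have hlt := hbefore c hcP
        have hoff := adj_nbr (adj_symm hadj)
        have hcup : c = (p.1 - 1, p.2) ∨ c = (p.1, p.2 - 1) := by
          rcases hoff with h | h | h | h
          · exact Or.inl h
          · exfalso; rw [h] at hlt; rcases hlt with h' | ⟨h', _⟩ <;> omega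
          · exact Or.inr h
          · exfalso; rw [h] at hlt; rcases hlt with h' | ⟨h', _⟩ <;> omega
        rcases hcup with rfl | rfl
        · exact Bool.or_eq_true_iff.mpr (Or.inl (by simpa using hcm))
        · exact Bool.or_eq_true_iff.mpr (Or.inr (by simpa using hcm))
    have hfilter_mem : ∀ ct ∈ F.2, ct ∈ comps ∧
        (ct.1.contains (p.1 - 1, p.2) || ct.1.contains (p.1, p.2 - 1)) = false := by
      intro ct hct
      rw [ha] at hct
      have := List.mem_filter.mp hct
      exact ⟨this.1, by simpa using this.2⟩
    have hreachp : ∀ q ∈ F.1.1, Reach g q p := by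
      intro q hq
      rcases (hmemC q).mp hq with rfl | ⟨ct, hct, hts, hqm⟩
      · exact Relation.ReflTransGen.refl
      · obtain ⟨c, hcm, hadj⟩ := (htouch_iff ct hct).mp hts
        exact Relation.ReflTransGen.tail ((hcomp ct hct).2.2.2.1 q hqm c hcm) hadj
    refine ⟨?_, ?_, ?_⟩
    · intro ct hct
      rcases List.mem_append.mp hct with hrest | hC
      · obtain ⟨hin, _⟩ := hfilter_mem ct hrest
        obtain ⟨hnd, hne, hmem, hre, hsum⟩ := hcomp ct hin
        exact ⟨hnd, hne, fun q hq => ⟨List.mem_append_left _ (hmem q hq).1, (hmem q hq).2⟩,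
          hre, hsum⟩
      · rcases List.mem_singleton.mp hC with rfl
        have hpC : p ∈ F.1.1 := (hmemC p).mpr (Or.inl rfl)
        refine ⟨hndC, List.ne_nil_of_mem hpC, ?_, ?_, ?_⟩
        · intro q hq
          rcases (hmemC q).mp hq with rfl | ⟨ct', hct', _, hqm⟩
          · exact ⟨List.mem_append_right _ List.mem_cons_self, hPosPp⟩
          · exact ⟨List.mem_append_left _ ((hcomp ct' hct').2.2.1 _ hqm).1,
              ((hcomp ct' hct').2.2.1 _ hqm).2⟩
        · intro a haq b hbq
          exact Relation.ReflTransGen.trans (hreachp a haq) (reach_symm (hreachp b hbq))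
        · -- F.1.2 = vsum g F.1.1
          have hLn : (p :: ((comps.filter (fun ct =>
              ct.1.contains (p.1 - 1, p.2) || ct.1.contains (p.1, p.2 - 1))).flatMap
                (fun ct => ct.1))).Nodup := by
            rw [List.nodup_cons]
            constructor
            · intro hmem
              rw [List.mem_flatMap] at hmem
              obtain ⟨ct, hct, hpm⟩ := hmem
              exact hpP ((hcomp ct (List.mem_of_mem_filter hct)).2.2.1 _ hpm).1
            · apply nodup_flatMap_pv
              · exact fun ct hct => (hcomp ct (List.mem_of_mem_filter hct)).1
              · exact List.Pairwise.imp (fun h => h.1) (List.Pairwise.sublist List.filter_sublist hpw)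
          have hLiff : ∀ q, q ∈ (p :: ((comps.filter (fun ct =>
              ct.1.contains (p.1 - 1, p.2) || ct.1.contains (p.1, p.2 - 1))).flatMap
                (fun ct => ct.1))) ↔ q ∈ F.1.1 := by
            intro q
            rw [List.mem_cons, List.mem_flatMap, hmemC q]
            constructor
            · rintro (rfl | ⟨ct, hct, hqm⟩)
              · exact Or.inl rfl
              · have := List.mem_filter.mp hct
                exact Or.inr ⟨ct, this.1, this.2, hqm⟩
            · rintro (rfl | ⟨ct, hct, hts, hqm⟩)
              · exact Or.inl rfl
              · exact Or.inr ⟨ct, List.mem_filter.mpr ⟨hct, hts⟩, hqm⟩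
          have hv1 : vsum g F.1.1 = vsum g (p :: ((comps.filter (fun ct =>
              ct.1.contains (p.1 - 1, p.2) || ct.1.contains (p.1, p.2 - 1))).flatMap
                (fun ct => ct.1))) :=
            vsum_eq_of_nodup_memiff hndC hLn (fun q => (hLiff q).symm)
          rw [hv1, hc]
          show pvCell g p.1 p.2 + _ = pvVal g p + _
          rw [show pvVal g p = pvCell g p.1 p.2 from rfl]
          congr 1
          show _ = vsum g _
          rw [vsum_flatMap]
          congr 1
          apply List.map_congr_left
          intro ct hct
          exact (hcomp ct (List.mem_of_mem_filter hct)).2.2.2.2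
    · intro q
      constructor
      · rintro ⟨hqm, hqpos⟩
        rcases List.mem_append.mp hqm with hqP | hqp
        · obtain ⟨ct, hct, hq⟩ := (hglob q).mp ⟨hqP, hqpos⟩
          by_cases hts : (ct.1.contains (p.1 - 1, p.2) || ct.1.contains (p.1, p.2 - 1)) = true
          · exact ⟨F.1, List.mem_append_right _ List.mem_cons_self,
              (hmemC q).mpr (Or.inr ⟨ct, hct, hts, hq⟩)⟩
          · refine ⟨ct, List.mem_append_left _ ?_, hq⟩
            rw [ha]
            exact List.mem_filter.mpr ⟨hct, by simpa using hts⟩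
        · rcases List.mem_singleton.mp hqp with rfl
          exact ⟨F.1, List.mem_append_right _ List.mem_cons_self, (hmemC q).mpr (Or.inl rfl)⟩
      · rintro ⟨ct, hct, hq⟩
        rcases List.mem_append.mp hct with hrest | hC
        · obtain ⟨hin, _⟩ := hfilter_mem ct hrest
          have := (hglob q).mpr ⟨ct, hin, hq⟩
          exact ⟨List.mem_append_left _ this.1, this.2⟩
        · rcases List.mem_singleton.mp hC with rfl
          rcases (hmemC q).mp hq with rfl | ⟨ct', hct', _, hqm⟩
          · exact ⟨List.mem_append_right _ List.mem_cons_self, hPosPp⟩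
          · have := (hglob q).mpr ⟨ct', hct', hqm⟩
            exact ⟨List.mem_append_left _ this.1, this.2⟩
    · rw [List.pairwise_append]
      refine ⟨?_, List.pairwise_singleton _ _, ?_⟩
      · rw [ha]
        exact List.Pairwise.sublist List.filter_sublist hpw
      · intro ct hrest C hC
        rcases List.mem_singleton.mp hC with rfl
        obtain ⟨hin, hts⟩ := hfilter_mem ct hrest
        have hdisj : ∀ a ∈ ct.1, a ∉ F.1.1 := by
          intro a haq hmem
          rcases (hmemC a).mp hmem with rfl | ⟨ct'', hct'', hts'', haq''⟩
          · exact hpP ((hcomp ct hin).2.2.1 _ haq).1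
          · by_cases hne : ct = ct''
            · rw [← hne, hts] at hts''; exact Bool.false_ne_true hts''
            · exact (hpair ct hin ct'' hct'' hne).1 a haq haq''
        refine ⟨hdisj, ?_⟩
        intro a haq b hbq hadj
        rcases (hmemC b).mp hbq with rfl | ⟨ct'', hct'', hts'', hbq''⟩
        · have hT := (htouch_iff ct hin).mpr ⟨a, haq, hadj⟩
          rw [hts] at hT; exact Bool.false_ne_true hT
        · by_cases hne : ct = ct''
          · rw [← hne, hts] at hts''; exact Bool.false_ne_true hts''
          · exact (hpair ct hin ct'' hct'' hne).2 a haq b hbq'' hadj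
  · have hstep : stepB g comps p = comps := by
      simp only [stepB, if_neg hpos]
    rw [hstep]
    refine ⟨?_, ?_, hpw⟩
    · intro ct hct
      obtain ⟨hnd, hne, hmem, hre, hsum⟩ := hcomp ct hct
      exact ⟨hnd, hne, fun q hq => ⟨List.mem_append_left _ (hmem q hq).1, (hmem q hq).2⟩,
        hre, hsum⟩
    · intro q
      constructor
      · rintro ⟨hqm, hqpos⟩
        rcases List.mem_append.mp hqm with hqP | hqp
        · exact (hglob q).mp ⟨hqP, hqpos⟩
        · rcases List.mem_singleton.mp hqp with rfl
          exact absurd hqpos.2 hpos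
      · rintro ⟨ct, hct, hq⟩
        have := (hglob q).mpr ⟨ct, hct, hq⟩
        exact ⟨List.mem_append_left _ this.1, this.2⟩

theorem foldl_invB {g : List (List Int)} :
    ∀ (suffix P : List (Int × Int)) (comps : List (PySem.Set (Int × Int) × Int)),
      pvCellList g = P ++ suffix → InvB g P comps →
      InvB g (pvCellList g) (suffix.foldl (stepB g) comps) := by
  intro suffix
  induction suffix with
  | nil => intro P comps hP h; simpa [hP] using h
  | cons p suf ih =>
    intro P comps hP h
    have hbp : pvInB g p = true := by
      apply (mem_cellList_iff g p).mp
      rw [hP]; exact List.mem_append_right _ List.mem_cons_self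
    have hbefore : ∀ c ∈ P, rmLt c p := by
      have hpw := cellList_pairwise g
      rw [hP, List.pairwise_append] at hpw
      intro c hc
      exact hpw.2.2 c hc p List.mem_cons_self
    have h1 : InvB g (P ++ [p]) (stepB g comps p) := stepB_preserve h hbp hbefore
    have h2 := ih (P ++ [p]) (stepB g comps p) (by rw [hP]; simp) h1
    simpa using h2

-- ---- final comparison ----

theorem foldl_ifmax (l : List (PySem.Set (Int × Int) × Int)) :
    ∀ b : Int, l.foldl (fun best ct => if best < ct.2 then ct.2 else best) b
      = (l.map (fun ct => ct.2)).foldl max b := by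
  induction l with
  | nil => intro b; simp
  | cons x xs ih =>
    intro b
    simp only [List.foldl_cons, List.map_cons]
    rw [ih]
    congr 1
    rcases lt_or_ge b x.2 with h | h
    · simp [h, max_eq_right h.le]
    · simp [not_lt.mpr h, max_eq_left h]

theorem comp_is_class {g : List (List Int)} {comps : List (PySem.Set (Int × Int) × Int)}
    (hInv : InvB g (pvCellList g) comps) {ct : PySem.Set (Int × Int) × Int}
    (hct : ct ∈ comps) {a : Int × Int} (ha : a ∈ ct.1) :
    ∀ q, q ∈ ct.1 ↔ Reach g a q := by
  obtain ⟨hcomp, hglob, hpw⟩ := hInv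
  have hpairR : Symmetric (fun (c c' : PySem.Set (Int × Int) × Int) =>
      (∀ a ∈ c.1, a ∉ c'.1) ∧ (∀ a ∈ c.1, ∀ b ∈ c'.1, ¬ AdjP g a b)) := by
    intro c c' ⟨hd, he⟩
    refine ⟨fun a ha hmem => hd a hmem ha, fun a ha b hb hadj => he b hb a ha (adj_symm hadj)⟩
  intro q
  constructor
  · exact fun hq => (hcomp ct hct).2.2.2.1 a ha q hq
  · intro hr
    induction hr with
    | refl => exact ha
    | tail _ e ih =>
      rename_i c q' _
      have hqpos : PosP g q' := e.2.1
      have hqcell : q' ∈ pvCellList g := (mem_cellList_iff g q').mpr hqpos.1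
      obtain ⟨ct'', hct'', hq''⟩ := (hglob q').mp ⟨hqcell, hqpos⟩
      by_cases hne : ct = ct''
      · rw [hne]; exact hq''
      · exact absurd e ((hpw.forall hpairR hct hct'' hne).2 c ih q' hq'')

theorem processA_eq_processB (g : List (List Int)) : processA g = processB g := by
  rw [processA_eq_max, processB_eq_fold, foldl_ifmax]
  have h0B : InvB g [] [] := ⟨by simp, by simp, by simp⟩
  have hB := foldl_invB (pvCellList g) [] [] (by simp) h0B
  obtain ⟨hcomp, hglob, hpw⟩ := hB
  apply le_antisymm
  · apply listMax0_le (listMax0_nonneg _)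
    intro v hv
    obtain ⟨pc, hpcf, rfl⟩ := List.mem_map.mp hv
    obtain ⟨hpcc, hpcb⟩ := List.mem_filter.mp hpcf
    have hpcp : PosP g pc := (posB_iff g pc).mp hpcb
    obtain ⟨ct, hct, hpcm⟩ := (hglob pc).mp ⟨hpcc, hpcp⟩
    have hiff := comp_is_class ⟨hcomp, hglob, hpw⟩ hct hpcm
    have hv2 : ct.2 = classSum g pc := by
      rw [(hcomp ct hct).2.2.2.2]
      exact vsum_eq_classSum (hcomp ct hct).1 hpcp hiff
    rw [← hv2]
    exact le_foldl_max_mem _ 0 _ (List.mem_map.mpr ⟨ct, hct, rfl⟩)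
  · apply foldl_max_le _ _ _ (listMax0_nonneg _)
    intro v hv
    obtain ⟨ct, hct, rfl⟩ := List.mem_map.mp hv
    obtain ⟨a, ha⟩ := List.exists_mem_of_ne_nil _ (hcomp ct hct).2.1
    have hap : PosP g a := ((hcomp ct hct).2.2.1 a ha).2
    have hac : a ∈ pvCellList g := ((hcomp ct hct).2.2.1 a ha).1
    have hiff := comp_is_class ⟨hcomp, hglob, hpw⟩ hct ha
    have hv2 : ct.2 = classSum g a := by
      rw [(hcomp ct hct).2.2.2.2]
      exact vsum_eq_classSum (hcomp ct hct).1 hap hiff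
    rw [hv2]
    exact le_listMax0 (List.mem_map.mpr ⟨a,
      List.mem_filter.mpr ⟨hac, (posB_iff g a).mpr hap⟩, rfl⟩)

-- ===== VERDICT (by name: the statement is the Claim_ definition above) =====
theorem max_volume_spec : Claim_equal_max_volume := by
  unfold Claim_equal_max_volume
  intro tcs _ _
  unfold Spec_max_volume max_volume max_volume_alt
  induction tcs using List.reverseRecOn with
  | nil => rfl
  | append_singleton xs x ih => simp [List.foldl_append, processA_eq_processB]
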